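-- pv_equiv track=rewrite | github.com/idiomaticrefactoring/IdiomatizationLLM | code/ours/assign_multi_tar/code_extract_multi_ass.py | group_consecutive_assignments
-- ===== SOURCE A (Python) =====
-- def group_consecutive_assignments(code):
--         assignments = []
--         current_group = []
--         lines = code.split('\n')
--         for line in lines:
--             if '=' in line:
--                 current_group.append(line.strip())
--             elif current_group:
--                 assignments.append(current_group)
--                 current_group = []
--         if current_group:
--             assignments.append(current_group)
--         return assignments
-- ===== SOURCE B (Python) =====
-- def group_consecutive_assignments(code):
--     lines = code.split('\n')
--     res = []
--     i, n = 0, len(lines)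
--     while i < n:
--         if '=' in lines[i]:
--             j = i
--             while j < n and '=' in lines[j]:
--                 j += 1
--             res.append([lines[k].strip() for k in range(i, j)])
--             i = j
--         else:
--             i += 1
--     return res
-- ===== Notes on version B (the rewrite author's own statement) =====
-- stated objective: alternative
-- what changed: Replaces the accumulator/flush state machine with a two-pointer span scan: at each '='-line it advances an inner pointer over the whole run and emits the stripped segment at once, so no current_group/flush bookkeeping remains.
import Mathlib
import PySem

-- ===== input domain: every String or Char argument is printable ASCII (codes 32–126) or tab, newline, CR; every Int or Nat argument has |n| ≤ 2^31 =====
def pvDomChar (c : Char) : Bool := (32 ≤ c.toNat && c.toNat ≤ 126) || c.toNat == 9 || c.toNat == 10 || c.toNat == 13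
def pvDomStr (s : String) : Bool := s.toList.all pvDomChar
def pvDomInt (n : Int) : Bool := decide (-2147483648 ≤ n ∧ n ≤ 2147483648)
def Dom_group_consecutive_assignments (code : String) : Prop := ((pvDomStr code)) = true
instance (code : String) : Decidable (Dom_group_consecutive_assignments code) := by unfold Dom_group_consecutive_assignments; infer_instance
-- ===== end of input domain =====

-- B replaces A's accumulator/flush state machine with a span scan that emits each run of '='-lines at once (alternative decomposition, same cost).

-- ===== PORT A =====
def pvHasEq (l : String) : Bool := PySem.Str.isIn "=" l

-- the for-loop over lines with state (assignments, current_group)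
def pvALoop : List String → List (List String) → List String → List (List String) × List String
  | [], acc, cur => (acc, cur)
  | l :: ls, acc, cur =>
    if pvHasEq l then pvALoop ls acc (cur ++ [PySem.Str.strip l])
    else if cur ≠ [] then pvALoop ls (acc ++ [cur]) []
    else pvALoop ls acc cur

def group_consecutive_assignments (code : String) : List (List String) :=
  let lines := (PySem.Str.split? code "\n").getD []
  let st := pvALoop lines [] []
  if st.2 ≠ [] then st.1 ++ [st.2] else st.1

-- ===== PORT B =====
-- Source B's outer while advances over the remaining lines; the inner while spans the run of
-- '='-lines (takeWhile) and the outer pointer jumps past it (dropWhile).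
def pvBGo : List String → List (List String)
  | [] => []
  | l :: ls =>
    if h : pvHasEq l = true then
      ((l :: ls).takeWhile pvHasEq).map PySem.Str.strip :: pvBGo ((l :: ls).dropWhile pvHasEq)
    else pvBGo ls
  termination_by ls => ls.length
  decreasing_by
    · simp only [List.dropWhile_cons, h, if_true, List.length_cons]
      exact Nat.lt_succ_of_le (List.length_dropWhile_le _ _)
    · simp

def group_consecutive_assignments_alt (code : String) : List (List String) :=
  pvBGo ((PySem.Str.split? code "\n").getD [])

-- ===== PRECONDITION & SPEC =====
def Spec_group_consecutive_assignments (code : String) (out : List (List String)) : Prop := out = group_consecutive_assignments_alt code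
instance (code : String) (out : List (List String)) : Decidable (Spec_group_consecutive_assignments code out) := by unfold Spec_group_consecutive_assignments; infer_instance

-- ===== CLAIM (what is proved, stated in full; the proofs are below) =====
def Claim_equal_group_consecutive_assignments : Prop := ∀ (code : String), Dom_group_consecutive_assignments code → Spec_group_consecutive_assignments code (group_consecutive_assignments code)

-- ===== LEMMAS AND PROOFS =====

-- A's loop with pending group `cur`, already flushed at the end (the "continuation" form of A)
def pvACont (lines : List String) (cur : List String) : List (List String) :=
  let st := pvALoop lines [] cur
  if st.2 ≠ [] then st.1 ++ [st.2] else st.1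

lemma pvALoop_acc (lines : List String) : ∀ acc cur,
    pvALoop lines acc cur = (acc ++ (pvALoop lines [] cur).1, (pvALoop lines [] cur).2) := by
  induction lines with
  | nil => intro acc cur; simp [pvALoop]
  | cons l ls ih =>
    intro acc cur
    by_cases h : pvHasEq l = true
    · simp only [pvALoop, h, if_true]; exact ih acc _
    · by_cases hc : cur = []
      · subst hc; simp only [pvALoop, h]; simpa using ih acc []
      · simp only [pvALoop, h, hc, Bool.false_eq_true, if_false, ne_eq, not_false_eq_true,
          if_true, List.nil_append]
        rw [ih (acc ++ [cur]) [], ih [cur] []]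
        simp

lemma pvACont_cons_eq (l : String) (ls : List String) (cur : List String) (h : pvHasEq l = true) :
    pvACont (l :: ls) cur = pvACont ls (cur ++ [PySem.Str.strip l]) := by
  simp [pvACont, pvALoop, h]

lemma pvACont_cons_ne (l : String) (ls : List String) (cur : List String) (h : ¬ pvHasEq l = true) :
    pvACont (l :: ls) cur = if cur = [] then pvACont ls [] else cur :: pvACont ls [] := by
  by_cases hc : cur = []
  · simp [pvACont, pvALoop, h, hc]
  · simp only [pvACont, pvALoop, h, Bool.false_eq_true, if_false, hc, ne_eq, not_false_eq_true,
      if_true, List.nil_append]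
    rw [pvALoop_acc ls [cur] []]
    by_cases h2 : (pvALoop ls [] []).2 = [] <;> simp [h2]

-- the span characterisation: A's continuation form equals B's span scan
lemma pvACont_eq_pvBGo (lines : List String) :
    (∀ cur, cur ≠ [] →
      pvACont lines cur = (cur ++ (lines.takeWhile pvHasEq).map PySem.Str.strip)
        :: pvBGo (lines.dropWhile pvHasEq))
    ∧ pvACont lines [] = pvBGo lines := by
  induction lines with
  | nil => exact ⟨fun cur hc => by simp [pvACont, pvALoop, pvBGo, hc], by simp [pvACont, pvALoop, pvBGo]⟩
  | cons l ls ih =>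
    by_cases h : pvHasEq l = true
    · refine ⟨fun cur hc => ?_, ?_⟩
      · rw [pvACont_cons_eq l ls cur h, (ih.1 _ (by simp))]
        simp [h]
      · rw [pvACont_cons_eq l ls [] h, ih.1 _ (by simp)]
        conv_rhs => rw [pvBGo]
        simp [h]
    · refine ⟨fun cur hc => ?_, ?_⟩
      · rw [pvACont_cons_ne l ls cur h]
        simp only [hc, if_false, ih.2]
        simp only [List.takeWhile_cons, List.dropWhile_cons, h, Bool.false_eq_true, if_false,
          List.map_nil, List.append_nil]
        conv_rhs => rw [pvBGo]
        simp [h]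
      · rw [pvACont_cons_ne l ls [] h]
        simp only [if_true, ih.2]
        conv_rhs => rw [pvBGo]
        simp [h]

-- ===== VERDICT (by name: the statement is the Claim_ definition above) =====
theorem group_consecutive_assignments_spec : Claim_equal_group_consecutive_assignments := by
  intro code _
  unfold Spec_group_consecutive_assignments group_consecutive_assignments group_consecutive_assignments_alt
  exact (pvACont_eq_pvBGo ((PySem.Str.split? code "\n").getD [])).2
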